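-- pv_equiv track=rewrite | github.com/Raneem-mahajne/creating_transformer | IntegerStringGenerator.py | verify_sequence
-- ===== SOURCE A (Python) =====
-- def verify_sequence(sequence: list[int]) -> tuple[list[int], bool]:
--     """Verify: if previous is even and there was a last odd, current must equal that last odd."""
--     if len(sequence) == 0:
--         return [], True
--     correctness = [1]  # First position is always correct
--     last_odd = sequence[0] if sequence[0] % 2 == 1 else None
--
--     for i in range(1, len(sequence)):
--         prev = sequence[i - 1]
--         curr = sequence[i]
--         if prev % 2 == 0:  # Previous is even
--             if last_odd is not None:
--                 correctness.append(1 if curr == last_odd else 0)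
--             else:
--                 correctness.append(1)  # No last odd, anything is fine
--         else:  # Previous is odd, current can be anything
--             correctness.append(1)
--         if curr % 2 == 1:
--             last_odd = curr
--     return correctness, all(c == 1 for c in correctness)
-- ===== SOURCE B (Python) =====
-- def verify_sequence(sequence: list[int]) -> tuple[list[int], bool]:
--     """Verify: if previous is even and there was a last odd, current must equal that last odd."""
--     if not sequence:
--         return [], True
--     # one pass building last_before[i] = last odd value strictly before index i
--     last_before = []
--     lo = None
--     for v in sequence:
--         last_before.append(lo)
--         if v % 2 == 1:
--             lo = v
--     correctness = [1] + [
--         0 if prev % 2 == 0 and lb is not None and curr != lb else 1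
--         for prev, lb, curr in zip(sequence, last_before[1:], sequence[1:])
--     ]
--     return correctness, all(c == 1 for c in correctness)
-- ===== Notes on version B (the rewrite author's own statement) =====
-- stated objective: alternative
-- what changed: Replaced A's single stateful loop that interleaves checking with last-odd tracking by a two-phase decomposition: first a pass building a prefix table last_before of the last odd value strictly before each index, then a zip comprehension computing the flags from (prev, last_before, curr) triples.
import Mathlib
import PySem

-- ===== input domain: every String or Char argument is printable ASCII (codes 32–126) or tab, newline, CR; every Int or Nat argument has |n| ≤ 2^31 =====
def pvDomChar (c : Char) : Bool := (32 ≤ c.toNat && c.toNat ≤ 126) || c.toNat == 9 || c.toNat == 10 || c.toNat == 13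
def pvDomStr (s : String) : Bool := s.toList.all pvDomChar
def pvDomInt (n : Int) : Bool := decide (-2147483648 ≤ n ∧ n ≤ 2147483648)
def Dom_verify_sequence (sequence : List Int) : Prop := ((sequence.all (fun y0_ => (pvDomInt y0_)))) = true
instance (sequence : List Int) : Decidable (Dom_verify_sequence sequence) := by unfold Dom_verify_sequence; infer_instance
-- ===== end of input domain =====

-- B replaces A's single stateful loop by a prefix table of last odd values plus a zip comprehension (objective: alternative decomposition).

-- ===== PORT A =====
-- A's for-loop over i in range(1, len): state = (correctness, last_odd), prev/curr read from the list.
def vsLoopA (prev : Int) (rest : List Int) (corr : List Int) (lastOdd : Option Int) : List Int :=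
  match rest with
  | [] => corr
  | curr :: rs =>
    let corr' := corr ++ [if PySem.Int.mod prev 2 = 0 then
        (match lastOdd with
         | some lo => if curr = lo then (1 : Int) else 0
         | none => 1)
      else 1]
    let lastOdd' := if PySem.Int.mod curr 2 = 1 then some curr else lastOdd
    vsLoopA curr rs corr' lastOdd'

def verify_sequence (sequence : List Int) : List Int × Bool :=
  match sequence with
  | [] => ([], true)
  | s0 :: rs =>
    let lastOdd : Option Int := if PySem.Int.mod s0 2 = 1 then some s0 else none
    let correctness := vsLoopA s0 rs [1] lastOdd
    (correctness, correctness.all (fun c => c == 1))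

-- ===== PORT B =====
-- the prefix pass: last_before[i] = last odd value strictly before index i
def lastBefore (sequence : List Int) : List (Option Int) :=
  (sequence.foldl
    (fun (st : List (Option Int) × Option Int) v =>
      (st.1 ++ [st.2], if PySem.Int.mod v 2 = 1 then some v else st.2))
    ([], none)).1

-- the comprehension body: 0 if prev even and lb is not None and curr != lb else 1
def ruleB (prev : Int) (lb : Option Int) (curr : Int) : Int :=
  if PySem.Int.mod prev 2 = 0 ∧ lb.isSome ∧ lb ≠ some curr then 0 else 1

def verify_sequence_alt (sequence : List Int) : List Int × Bool :=
  match sequence with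
  | [] => ([], true)
  | _ =>
    let lb := lastBefore sequence
    let correctness :=
      1 :: (((sequence.zip (lb.drop 1)).zip (sequence.drop 1)).map
              (fun p => ruleB p.1.1 p.1.2 p.2))
    (correctness, correctness.all (fun c => c == 1))

-- ===== PRECONDITION & SPEC =====
def Spec_verify_sequence (sequence : List Int) (out : List Int × Bool) : Prop := out = verify_sequence_alt sequence
instance (sequence : List Int) (out : List Int × Bool) : Decidable (Spec_verify_sequence sequence out) := by unfold Spec_verify_sequence; infer_instance

-- ===== CLAIM (what is proved, stated in full; the proofs are below) =====
def Claim_equal_verify_sequence : Prop := ∀ (sequence : List Int), Dom_verify_sequence sequence → Spec_verify_sequence sequence (verify_sequence sequence)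

-- ===== LEMMAS AND PROOFS =====

-- reference recursion both ports are reduced to
def gFlags (prev : Int) (lo : Option Int) (rest : List Int) : List Int :=
  match rest with
  | [] => []
  | curr :: rs =>
    ruleB prev lo curr ::
      gFlags curr (if PySem.Int.mod curr 2 = 1 then some curr else lo) rs

-- the list form of the prefix pass
def lbList (lo : Option Int) (l : List Int) : List (Option Int) :=
  match l with
  | [] => []
  | v :: vs => lo :: lbList (if PySem.Int.mod v 2 = 1 then some v else lo) vs

theorem ruleA_eq_ruleB (prev : Int) (lo : Option Int) (curr : Int) :
    (if PySem.Int.mod prev 2 = 0 then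
      (match lo with
       | some l => if curr = l then (1 : Int) else 0
       | none => 1)
     else 1) = ruleB prev lo curr := by
  unfold ruleB
  cases lo with
  | none => by_cases h : PySem.Int.mod prev 2 = 0 <;> simp [h]
  | some x =>
    by_cases h : PySem.Int.mod prev 2 = 0 <;> by_cases hc : curr = x <;>
      simp [h, hc, eq_comm]

theorem vsLoopA_eq (rest : List Int) : ∀ (prev : Int) (corr : List Int) (lo : Option Int),
    vsLoopA prev rest corr lo = corr ++ gFlags prev lo rest := by
  induction rest with
  | nil => intro prev corr lo; simp [vsLoopA, gFlags]
  | cons curr rs ih =>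
    intro prev corr lo
    simp only [vsLoopA, gFlags, ih, List.append_assoc, List.singleton_append,
      ruleA_eq_ruleB]

theorem lastBefore_fold (l : List Int) : ∀ (acc : List (Option Int)) (lo : Option Int),
    (l.foldl
      (fun (st : List (Option Int) × Option Int) v =>
        (st.1 ++ [st.2], if PySem.Int.mod v 2 = 1 then some v else st.2))
      (acc, lo)).1 = acc ++ lbList lo l := by
  induction l with
  | nil => intro acc lo; simp [lbList]
  | cons v vs ih =>
    intro acc lo
    simp only [List.foldl_cons, ih, lbList, List.append_assoc, List.singleton_append]

theorem zipmap_eq (rs : List Int) : ∀ (s0 : Int) (lo : Option Int),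
    (((s0 :: rs).zip (lbList lo rs)).zip rs).map (fun p => ruleB p.1.1 p.1.2 p.2)
      = gFlags s0 lo rs := by
  induction rs with
  | nil => intro s0 lo; simp [gFlags]
  | cons curr rs' ih =>
    intro s0 lo
    simp only [lbList, List.zip_cons_cons, List.map_cons, gFlags]
    exact congrArg _ (ih curr _)

-- ===== VERDICT (by name: the statement is the Claim_ definition above) =====
theorem verify_sequence_spec : Claim_equal_verify_sequence := by
  intro sequence _
  unfold Spec_verify_sequence
  cases sequence with
  | nil => rfl
  | cons s0 rs =>
    have hlb : lastBefore (s0 :: rs) = lbList none (s0 :: rs) := by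
      unfold lastBefore; exact lastBefore_fold _ [] none
    simp only [verify_sequence, verify_sequence_alt, vsLoopA_eq, hlb, lbList,
      List.drop_succ_cons, List.drop_zero, zipmap_eq, List.singleton_append]
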